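-- pv_equiv track=rewrite | github.com/TheCoffeeGuyy/bigoOrange | DynamicI/Bytelandian.py | calc
-- ===== SOURCE A (Python) =====
-- maxx = 10000000
--
-- dp = [0] * maxx
--
-- def calc(n):
--     if n < 3: return n
--     if n < maxx and dp[n] != 0:
--         return dp[n]
--     result = max(calc(n//2) + calc(n//3) + calc(n//4), n)
--     if n < maxx:
--         dp[n] = result
--     return result
-- ===== SOURCE B (Python) =====
-- def calc(n):
--     # Two-phase: collect the reachable states once (DFS with a
--     # visited set), then fill a dict bottom-up over the sorted states. No global
--     # ten-million-entry table; unlike A it does not cache across calls (return value is the same).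
--     states = set()
--
--     def collect(m):
--         if m in states:
--             return
--         states.add(m)
--         if m >= 3:
--             collect(m // 2)
--             collect(m // 3)
--             collect(m // 4)
--
--     collect(n)
--     best = {}
--     for m in sorted(states):
--         if m < 3:
--             best[m] = m
--         else:
--             best[m] = max(best[m // 2] + best[m // 3] + best[m // 4], m)
--     return best[n]
-- ===== Notes on version B (the rewrite author's own statement) =====
-- stated objective: alternative
-- what changed: A is top-down recursion caching into a fixed global ten-million-entry array (only for n < maxx); B collects the reachable states once with a DFS over a visited set and then fills a per-call dict bottom-up over the sorted states, with no global table and no size bound.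
import Mathlib
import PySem

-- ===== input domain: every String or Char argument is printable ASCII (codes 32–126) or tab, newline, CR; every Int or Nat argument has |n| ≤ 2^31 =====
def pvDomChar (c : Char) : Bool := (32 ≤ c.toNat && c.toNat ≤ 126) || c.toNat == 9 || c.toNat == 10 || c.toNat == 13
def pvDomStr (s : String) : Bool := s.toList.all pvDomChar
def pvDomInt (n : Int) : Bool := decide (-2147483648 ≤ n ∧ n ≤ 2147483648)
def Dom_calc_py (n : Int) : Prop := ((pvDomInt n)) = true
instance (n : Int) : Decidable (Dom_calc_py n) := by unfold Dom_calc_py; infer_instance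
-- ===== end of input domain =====

-- B replaces A's top-down recursion over a fixed global ten-million-entry memo array with a
-- two-phase bottom-up dict DP over the (few) reachable states; equivalence is about the
-- return value only (A additionally mutates its global cache dp, which B does not keep).

-- ===== PORT A =====
-- A's global array dp only caches values the recursion itself computes (all stored values
-- are ≥ 3, so the `dp[n] != 0` test only ever hits correct cached results); it changes
-- speed, never the returned value, so the faithful port of the returned value is the
-- plain recursion.
def calc_py (n : Int) : Int :=
  if n < 3 then n
  else
    max (calc_py (PySem.Int.floordiv n 2) + calc_py (PySem.Int.floordiv n 3) +
          calc_py (PySem.Int.floordiv n 4)) n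
termination_by n.toNat
decreasing_by
  all_goals rw [PySem.Int.floordiv_eq_ediv_of_pos (by omega)]; omega

-- ===== PORT B =====
-- phase 1: DFS collecting the set of reachable states (Source B's `collect`)
def collectB (m : Int) (s : PySem.Set Int) : PySem.Set Int :=
  if PySem.Set.contains s m then s
  else
    let s1 := PySem.Set.add s m
    if 3 ≤ m then
      collectB (PySem.Int.floordiv m 4)
        (collectB (PySem.Int.floordiv m 3) (collectB (PySem.Int.floordiv m 2) s1))
    else s1
termination_by m.toNat
decreasing_by
  all_goals rw [PySem.Int.floordiv_eq_ediv_of_pos (by omega)]; omega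

-- the body of Source B's `for m in sorted(states)` loop
def stepB (d : PySem.Dict Int Int) (m : Int) : PySem.Dict Int Int :=
  if m < 3 then d.insert m m
  else
    d.insert m
      (max (d.getD (PySem.Int.floordiv m 2) 0 + d.getD (PySem.Int.floordiv m 3) 0 +
             d.getD (PySem.Int.floordiv m 4) 0) m)

-- the dict lookups best[m//k] / best[n] are on keys that are always present (proved
-- below), so porting them with getD's never-used default 0 is exact
def calc_py_alt (n : Int) : Int :=
  let states := collectB n PySem.Set.empty
  let best := (PySem.List.sorted states (fun x => x) false).foldl stepB PySem.Dict.empty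
  best.getD n 0

-- ===== PRECONDITION & SPEC =====
def Spec_calc_py (n : Int) (out : Int) : Prop := out = calc_py_alt n
instance (n : Int) (out : Int) : Decidable (Spec_calc_py n out) := by unfold Spec_calc_py; infer_instance

-- ===== CLAIM (what is proved, stated in full; the proofs are below) =====
def Claim_equal_calc_py : Prop := ∀ (n : Int), Dom_calc_py n → Spec_calc_py n (calc_py n)

-- ===== LEMMAS AND PROOFS =====

-- s is closed under taking children m//2, m//3, m//4, except possibly at elements of E
def ClosedExc (s : PySem.Set Int) (E : Int → Prop) : Prop :=
  ∀ x ∈ s, ¬ E x → 3 ≤ x →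
    PySem.Int.floordiv x 2 ∈ s ∧ PySem.Int.floordiv x 3 ∈ s ∧ PySem.Int.floordiv x 4 ∈ s

theorem fd_lt (m : Int) (k : Int) (hm : 3 ≤ m) (hk : k = 2 ∨ k = 3 ∨ k = 4) :
    PySem.Int.floordiv m k < m ∧ 0 ≤ PySem.Int.floordiv m k := by
  rw [PySem.Int.floordiv_eq_ediv_of_pos (by omega)]
  rcases hk with rfl | rfl | rfl <;> omega

theorem collect_spec (m : Int) (s : PySem.Set Int) (E : Int → Prop)
    (hc : ClosedExc s E) (hn : s.Nodup) :
    (∀ x ∈ s, x ∈ collectB m s) ∧ m ∈ collectB m s ∧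
      ClosedExc (collectB m s) E ∧ (collectB m s).Nodup := by
  rw [collectB]
  by_cases hmem : PySem.Set.contains s m
  · simp only [hmem, if_true]
    exact ⟨fun x hx => hx, (PySem.Set.contains_iff s m).mp hmem, hc, hn⟩
  · simp only [hmem]
    have hmns : m ∉ s := fun h => hmem ((PySem.Set.contains_iff s m).mpr h)
    have hs1mem : ∀ x, x ∈ PySem.Set.add s m ↔ x ∈ s ∨ x = m := fun x => PySem.Set.mem_add s m x
    have hs1n : (PySem.Set.add s m).Nodup := PySem.Set.nodup_add s m hn
    by_cases h3 : 3 ≤ m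
    · simp only [h3, if_true]
      -- closedness of s.add m, excusing m as well
      have hc1 : ClosedExc (PySem.Set.add s m) (fun x => E x ∨ x = m) := by
        intro x hx hEx hx3
        rcases (hs1mem x).mp hx with hxs | rfl
        · have := hc x hxs (fun h => hEx (Or.inl h)) hx3
          exact ⟨(hs1mem _).mpr (Or.inl this.1), (hs1mem _).mpr (Or.inl this.2.1),
                 (hs1mem _).mpr (Or.inl this.2.2)⟩
        · exact absurd rfl (fun h => hEx (Or.inr h))
      have ih1 := collect_spec (PySem.Int.floordiv m 2) (PySem.Set.add s m)
        (fun x => E x ∨ x = m) hc1 hs1n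
      have ih2 := collect_spec (PySem.Int.floordiv m 3) _ (fun x => E x ∨ x = m) ih1.2.2.1 ih1.2.2.2
      have ih3 := collect_spec (PySem.Int.floordiv m 4) _ (fun x => E x ∨ x = m) ih2.2.2.1 ih2.2.2.2
      refine ⟨?_, ?_, ?_, ih3.2.2.2⟩
      · intro x hx
        exact ih3.1 _ (ih2.1 _ (ih1.1 _ ((hs1mem x).mpr (Or.inl hx))))
      · exact ih3.1 _ (ih2.1 _ (ih1.1 _ ((hs1mem m).mpr (Or.inr rfl))))
      · intro x hx hEx hx3
        by_cases hxm : x = m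
        · subst hxm
          exact ⟨ih3.1 _ (ih2.1 _ ih1.2.1), ih3.1 _ ih2.2.1, ih3.2.1⟩
        · exact ih3.2.2.1 x hx (fun h => h.elim hEx hxm) hx3
    · simp only [h3, if_false]
      refine ⟨fun x hx => (hs1mem x).mpr (Or.inl hx), (hs1mem m).mpr (Or.inr rfl), ?_, hs1n⟩
      intro x hx hEx hx3
      rcases (hs1mem x).mp hx with hxs | rfl
      · have := hc x hxs hEx hx3
        exact ⟨(hs1mem _).mpr (Or.inl this.1), (hs1mem _).mpr (Or.inl this.2.1),
               (hs1mem _).mpr (Or.inl this.2.2)⟩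
      · omega
termination_by m.toNat
decreasing_by
  all_goals rw [PySem.Int.floordiv_eq_ediv_of_pos (by omega)]; omega

-- the bottom-up fold fills the dict with exactly the values of A's recursion
theorem fold_spec (S : PySem.Set Int) (hS : ClosedExc S (fun _ => False)) :
    ∀ (rest : List Int) (d : PySem.Dict Int Int),
      rest.Pairwise (· < ·) → (∀ x ∈ rest, x ∈ S) →
      (∀ x ∈ S, x ∈ rest ∨ d.get? x = some (calc_py x)) →
      ∀ x ∈ S, (rest.foldl stepB d).get? x = some (calc_py x) := by
  intro rest
  induction rest with
  | nil =>
    intro d _ _ hinv x hx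
    simpa using (hinv x hx).resolve_left (by simp)
  | cons m rest' ih =>
    intro d hpw hsub hinv x hx
    simp only [List.foldl_cons]
    have hmS : m ∈ S := hsub m (List.mem_cons_self)
    -- the new dict maps m to calc_py m
    have hstep : (stepB d m).get? m = some (calc_py m) := by
      by_cases h3 : m < 3
      · rw [stepB, if_pos h3, PySem.Dict.get?_insert_self, calc_py, if_pos h3]
      · have hkids := hS m hmS (by simp) (by omega)
        have hget : ∀ k : Int, k = 2 ∨ k = 3 ∨ k = 4 →
            PySem.Int.floordiv m k ∈ S → d.getD (PySem.Int.floordiv m k) 0 =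
              calc_py (PySem.Int.floordiv m k) := by
          intro k hk hkS
          have hlt := fd_lt m k (by omega) hk
          have hnotin : PySem.Int.floordiv m k ∉ m :: rest' := by
            intro hmem
            rcases List.mem_cons.mp hmem with heq | hmem'
            · omega
            · have := (List.pairwise_cons.mp hpw).1 _ hmem'
              omega
          have hg := (hinv _ hkS).resolve_left hnotin
          simp [PySem.Dict.getD_eq_get?_getD, hg]
        have hcalc : calc_py m = max (calc_py (PySem.Int.floordiv m 2) +
            calc_py (PySem.Int.floordiv m 3) + calc_py (PySem.Int.floordiv m 4)) m := by
          rw [calc_py, if_neg h3]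
        rw [stepB, if_neg h3, hget 2 (Or.inl rfl) hkids.1, hget 3 (Or.inr (Or.inl rfl)) hkids.2.1,
            hget 4 (Or.inr (Or.inr rfl)) hkids.2.2, PySem.Dict.get?_insert_self, hcalc]
    refine ih (stepB d m) (List.pairwise_cons.mp hpw).2
      (fun y hy => hsub y (List.mem_cons_of_mem _ hy)) ?_ x hx
    intro y hyS
    by_cases hym : y = m
    · right; rw [hym]; exact hstep
    · rcases hinv y hyS with hmem | hsome
      · rcases List.mem_cons.mp hmem with heq | h
        · exact absurd heq hym
        · exact Or.inl h
      · right
        rw [stepB]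
        split <;> exact (PySem.Dict.get?_insert_of_ne _ _ hym).trans hsome

-- ===== VERDICT (by name: the statement is the Claim_ definition above) =====
theorem calc_py_spec : Claim_equal_calc_py := by
  intro n _
  unfold Spec_calc_py calc_py_alt
  have hc0 : ClosedExc PySem.Set.empty (fun _ => False) := by
    intro x hx
    simp [PySem.Set.empty] at hx
  have hmain := collect_spec n PySem.Set.empty (fun _ => False) hc0 (by simp [PySem.Set.empty])
  set S := collectB n PySem.Set.empty with hSdef
  have hnS : n ∈ S := hmain.2.1
  have hcS : ClosedExc S (fun _ => False) := hmain.2.2.1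
  have hndS : S.Nodup := hmain.2.2.2
  set L := PySem.List.sorted S (fun x => x) false with hLdef
  have hperm : L.Perm S := PySem.List.sorted_perm S (fun x => x) false
  have hLnd : L.Nodup := hperm.nodup_iff.mpr hndS
  have hple : L.Pairwise (fun a b => a ≤ b) := PySem.List.sorted_pairwise S (fun x => x)
  have hplt : L.Pairwise (· < ·) :=
    (hple.and hLnd).imp (fun h => lt_of_le_of_ne h.1 h.2)
  have hmemL : ∀ x ∈ L, x ∈ S := fun x hx => hperm.mem_iff.mp hx
  have hinv : ∀ x ∈ S, x ∈ L ∨ (PySem.Dict.empty : PySem.Dict Int Int).get? x =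
      some (calc_py x) := fun x hx => Or.inl (hperm.mem_iff.mpr hx)
  have hfin := fold_spec S hcS L PySem.Dict.empty hplt hmemL hinv n hnS
  show calc_py n = (L.foldl stepB PySem.Dict.empty).getD n 0
  simp [PySem.Dict.getD_eq_get?_getD, hfin]
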